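-- pv_equiv track=rewrite | github.com/AndriiDiachenko/pyCheckIo | 0_Home/three-words.py | threeWordsCheck
-- ===== SOURCE A (Python) =====
-- def threeWordsCheck(text: str):
--     counter = 0
--     for w in text.split():
--         if w.isalpha():
--             counter +=1
--             if counter == 3:
--                 break
--         else:
--             counter = 0
--     return True if counter == 3 else False
-- ===== SOURCE B (Python) =====
-- def threeWordsCheck(text: str):
--     flags = [w.isalpha() for w in text.split()]
--     return any(flags[i] and flags[i + 1] and flags[i + 2]
--                for i in range(len(flags) - 2))
-- ===== Notes on version B (the rewrite author's own statement) =====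
-- stated objective: alternative
-- what changed: Replaces the reset-counter accumulator loop with a build-then-scan: compute the isalpha flag list once, then test each length-3 sliding window with any().
import Mathlib
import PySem

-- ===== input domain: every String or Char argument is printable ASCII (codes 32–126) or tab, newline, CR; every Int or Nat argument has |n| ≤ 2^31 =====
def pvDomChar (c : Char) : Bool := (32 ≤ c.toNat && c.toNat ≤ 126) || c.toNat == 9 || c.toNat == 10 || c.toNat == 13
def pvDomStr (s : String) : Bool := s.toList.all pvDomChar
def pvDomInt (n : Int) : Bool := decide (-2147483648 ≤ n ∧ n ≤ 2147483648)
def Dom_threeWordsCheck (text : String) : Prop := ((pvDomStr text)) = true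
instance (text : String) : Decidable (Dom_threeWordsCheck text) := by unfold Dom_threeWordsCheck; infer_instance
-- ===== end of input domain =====

-- B replaces A's reset-counter loop with a build-then-scan: an isalpha flag list checked by a length-3 sliding window (alternative decomposition, same cost).


-- ===== PORT A =====
-- A's loop: counter over the words, +1 on an alphabetic word (break at 3), reset to 0 otherwise.
def threeWordsCheckGo : List String → Int → Bool
  | [], counter => counter == 3
  | w :: ws, counter =>
    if PySem.Str.strIsalpha w then
      (if counter + 1 == 3 then true else threeWordsCheckGo ws (counter + 1))
    else threeWordsCheckGo ws 0

def threeWordsCheck (text : String) : Bool :=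
  threeWordsCheckGo (PySem.Str.split₀ text) 0

-- ===== PORT B =====
-- B: the flag list once, then the length-3 sliding window (the any(... for i in range(len-2)) scan).
def threeWordsWindow : List Bool → Bool
  | a :: b :: c :: rest => (a && b && c) || threeWordsWindow (b :: c :: rest)
  | _ => false

def threeWordsCheck_alt (text : String) : Bool :=
  threeWordsWindow ((PySem.Str.split₀ text).map PySem.Str.strIsalpha)

-- ===== PRECONDITION & SPEC =====
def Spec_threeWordsCheck (text : String) (out : Bool) : Prop := out = threeWordsCheck_alt text
instance (text : String) (out : Bool) : Decidable (Spec_threeWordsCheck text out) := by unfold Spec_threeWordsCheck; infer_instance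

-- ===== CLAIM (what is proved, stated in full; the proofs are below) =====
def Claim_equal_threeWordsCheck : Prop := ∀ (text : String), Dom_threeWordsCheck text → Spec_threeWordsCheck text (threeWordsCheck text)

-- ===== LEMMAS AND PROOFS =====
def pvHead1 : List Bool → Bool
  | t :: _ => t
  | [] => false

def pvHead2 : List Bool → Bool
  | a :: b :: _ => a && b
  | _ => false

theorem window_cons_false (l : List Bool) :
    threeWordsWindow (false :: l) = threeWordsWindow l := by
  match l with
  | [] => rfl
  | [_] => rfl
  | _ :: _ :: _ => simp [threeWordsWindow]

theorem window_cons_true (l : List Bool) :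
    threeWordsWindow (true :: l) = (pvHead2 l || threeWordsWindow l) := by
  match l with
  | [] => rfl
  | [_] => rfl
  | _ :: _ :: _ => simp [threeWordsWindow, pvHead2]

theorem pvHead2_cons_true (l : List Bool) : pvHead2 (true :: l) = pvHead1 l := by
  cases l <;> rfl

theorem pvHead_absorb (l : List Bool) (x : Bool) :
    (pvHead1 l || (pvHead2 l || x)) = (pvHead1 l || x) := by
  match l with
  | [] => rfl
  | [_] => rfl
  | a :: b :: _ => cases a <;> cases b <;> simp [pvHead1, pvHead2]

theorem pvHead2_cons_false (l : List Bool) : pvHead2 (false :: l) = false := by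
  cases l <;> simp [pvHead2]

theorem go_eq_window (ws : List String) :
    let fl := ws.map PySem.Str.strIsalpha
    (threeWordsCheckGo ws 0 = threeWordsWindow fl)
    ∧ (threeWordsCheckGo ws 1 = (pvHead2 fl || threeWordsWindow fl))
    ∧ (threeWordsCheckGo ws 2 = (pvHead1 fl || threeWordsWindow fl)) := by
  induction ws with
  | nil => simp [threeWordsCheckGo, threeWordsWindow, pvHead1, pvHead2]
  | cons w ws ih =>
    obtain ⟨ih0, ih1, ih2⟩ := ih
    simp only [List.map_cons]
    by_cases hf : PySem.Str.strIsalpha w = true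
    · have hf' : PySem.Chars.strIsalpha w.toList = true := by simpa using hf
      rw [hf]
      refine ⟨?_, ?_, ?_⟩
      · show threeWordsCheckGo (w :: ws) 0 = _
        rw [window_cons_true]
        simp [threeWordsCheckGo, hf']
        exact ih1
      · show threeWordsCheckGo (w :: ws) 1 = _
        rw [window_cons_true, pvHead2_cons_true, pvHead_absorb]
        simp [threeWordsCheckGo, hf']
        exact ih2
      · show threeWordsCheckGo (w :: ws) 2 = _
        simp [threeWordsCheckGo, hf', pvHead1]
    · have hf' : PySem.Chars.strIsalpha w.toList = false := by
        simpa using Bool.of_not_eq_true hf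
      rw [Bool.of_not_eq_true hf, window_cons_false]
      refine ⟨?_, ?_, ?_⟩ <;>
        simp [threeWordsCheckGo, hf', ih0, pvHead1, pvHead2_cons_false]

-- ===== VERDICT (by name: the statement is the Claim_ definition above) =====
theorem threeWordsCheck_spec : Claim_equal_threeWordsCheck := by
  intro text _
  unfold Spec_threeWordsCheck threeWordsCheck threeWordsCheck_alt
  exact (go_eq_window (PySem.Str.split₀ text)).1
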